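-- pv_equiv track=rewrite | github.com/ginanjarn/markdown_popup | markdown_popup.py | adapt_pre_block
-- ===== SOURCE A (Python) =====
-- def adapt_pre_block(text: str) -> str:
--     lines = []
--     pre_block = False
--     for line in text.split("\n"):
--         if not pre_block:
--             # open pre block
--             if line.startswith("<pre"):
--                 pre_block = True
--
--         if pre_block:
--             # closing pre block
--             if line.endswith("/pre>"):
--                 pre_block = False
--
--             else:
--                 # inside pre block
--                 line = line.replace("  ", "&nbsp;&nbsp;")
--                 line = f"{line}<br />"
--
--             lines.append(line)
--             continue
--
--         # outside pre block
--         lines.append(line)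
--
--     return "\n".join(lines)
-- ===== SOURCE B (Python) =====
-- def adapt_pre_block(text: str) -> str:
--     lines = text.split("\n")
--     flags = []
--     state = False
--     for line in lines:
--         state = (state or line.startswith("<pre")) and not line.endswith("/pre>")
--         flags.append(state)
--     return "\n".join(
--         line.replace("  ", "&nbsp;&nbsp;") + "<br />" if f else line
--         for f, line in zip(flags, lines)
--     )
-- ===== Notes on version B (the rewrite author's own statement) =====
-- stated objective: alternative
-- what changed: Replaces A's single fused loop (state update interleaved with string rewriting and appending) by two separated passes: a first scan that only records a per-line boolean flag from the carried pre-block state, then a second pass mapping flagged lines to their escaped form and joining.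
import Mathlib
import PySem

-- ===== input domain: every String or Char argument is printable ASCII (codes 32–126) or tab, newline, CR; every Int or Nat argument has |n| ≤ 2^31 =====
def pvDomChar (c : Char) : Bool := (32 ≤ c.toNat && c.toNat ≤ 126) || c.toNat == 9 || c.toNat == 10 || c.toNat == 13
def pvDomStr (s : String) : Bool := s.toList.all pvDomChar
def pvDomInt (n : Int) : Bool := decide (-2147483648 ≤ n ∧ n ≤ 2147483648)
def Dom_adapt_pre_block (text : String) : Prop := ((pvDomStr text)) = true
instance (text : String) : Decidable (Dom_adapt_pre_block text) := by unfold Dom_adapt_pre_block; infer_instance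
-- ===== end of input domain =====

-- B separates the pre-block STATE computation (one scan recording a flag per line) from the
-- string transformation (a second map over flagged lines); same values, simpler decomposition.

-- ===== PORT A =====
-- one fused loop: accumulator = (emitted lines, pre_block state)
def pvStepA (st : List String × Bool) (line : String) : List String × Bool :=
  let pre_block := if !st.2 then (if PySem.Str.startswith line "<pre" then true else st.2) else st.2
  if pre_block then
    if PySem.Str.endswith line "/pre>" then (st.1 ++ [line], false)
    else (st.1 ++ [PySem.Str.replace line "  " "&nbsp;&nbsp;" ++ "<br />"], true)
  else (st.1 ++ [line], pre_block)

def adapt_pre_block (text : String) : String :=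
  PySem.Str.join "\n" (((PySem.Str.split? text "\n").getD []).foldl pvStepA ([], false)).1

-- ===== PORT B =====
-- pass 1: record a boolean flag per line (accumulator = (flags, carried state))
def pvStepB (st : List Bool × Bool) (line : String) : List Bool × Bool :=
  let s := (st.2 || PySem.Str.startswith line "<pre") && !PySem.Str.endswith line "/pre>"
  (st.1 ++ [s], s)

def adapt_pre_block_alt (text : String) : String :=
  let lines := (PySem.Str.split? text "\n").getD []
  let flags := (lines.foldl pvStepB ([], false)).1
  PySem.Str.join "\n" ((flags.zip lines).map (fun p =>
    if p.1 then PySem.Str.replace p.2 "  " "&nbsp;&nbsp;" ++ "<br />" else p.2))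

-- ===== PRECONDITION & SPEC =====
def Spec_adapt_pre_block (text : String) (out : String) : Prop := out = adapt_pre_block_alt text
instance (text : String) (out : String) : Decidable (Spec_adapt_pre_block text out) := by unfold Spec_adapt_pre_block; infer_instance

-- ===== CLAIM (what is proved, stated in full; the proofs are below) =====
def Claim_equal_adapt_pre_block : Prop := ∀ (text : String), Dom_adapt_pre_block text → Spec_adapt_pre_block text (adapt_pre_block text)

-- ===== LEMMAS AND PROOFS =====
-- proof-side characterisation of the per-line flags
def pvFlags : Bool → List String → List Bool
  | _, [] => []
  | b, l :: ls =>
    let s := (b || PySem.Str.startswith l "<pre") && !PySem.Str.endswith l "/pre>"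
    s :: pvFlags s ls

def pvTr (p : Bool × String) : String :=
  if p.1 then PySem.Str.replace p.2 "  " "&nbsp;&nbsp;" ++ "<br />" else p.2

lemma pvStepB_fold (lines : List String) : ∀ (acc : List Bool) (b : Bool),
    (lines.foldl pvStepB (acc, b)).1 = acc ++ pvFlags b lines := by
  induction lines with
  | nil => intro acc b; simp [pvFlags]
  | cons l ls ih =>
    intro acc b
    simp only [List.foldl_cons, pvStepB, pvFlags, ih]
    simp

lemma pvStepA_fold (lines : List String) : ∀ (acc : List String) (b : Bool),
    (lines.foldl pvStepA (acc, b)).1 = acc ++ ((pvFlags b lines).zip lines).map pvTr := by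
  induction lines with
  | nil => intro acc b; simp [pvFlags]
  | cons l ls ih =>
    intro acc b
    simp only [List.foldl_cons, pvFlags]
    cases hb : b <;>
        cases hs : PySem.Chars.startswith l.toList ['<', 'p', 'r', 'e'] <;>
        cases he : PySem.Chars.endswith l.toList ['/', 'p', 'r', 'e', '>'] <;>
      simp [pvStepA, pvTr, hs, he, ih]

-- ===== VERDICT (by name: the statement is the Claim_ definition above) =====
theorem adapt_pre_block_spec : Claim_equal_adapt_pre_block := by
  intro text _
  unfold Spec_adapt_pre_block
  simp only [adapt_pre_block, adapt_pre_block_alt]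
  rw [pvStepA_fold, pvStepB_fold]
  rfl
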